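-- pv_equiv track=rewrite | github.com/pedro0102-hyand/logica-de-programacao | level3/multiplaleitura.py | calcular_ciclos
-- ===== SOURCE A (Python) =====
-- import math
--
-- def calcular_ciclos(rastro, P):
--     ciclos = 0
--     i = 0
--     n = len(rastro)
--
--     while i < n:
--         if rastro[i] == 'W':
--             # Cada gravação consome 1 ciclo
--             ciclos += 1
--             i += 1
--         else:
--             # Contar bloco contínuo de leituras
--             cont_leituras = 0
--             while i < n and rastro[i] == 'R':
--                 cont_leituras += 1
--                 i += 1
--             # Agrupar leituras em blocos de até P por ciclo
--             ciclos += math.ceil(cont_leituras / P)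
--
--     return ciclos
-- ===== SOURCE B (Python) =====
-- def calcular_ciclos(rastro, P):
--     # Writes are counted in one pass with .count; read-segment lengths are the
--     # gaps between consecutive 'W' positions found by list.index, so there is
--     # no per-element Python-level scan and no running read counter.
--     n = len(rastro)
--     total = rastro.count('W')
--     start = 0
--     while start < n:
--         k = rastro.index('W', start) if 'W' in rastro[start:] else n
--         if start < k:
--             total += -(-(k - start) // P)
--         start = k + 1
--     return total
-- ===== Notes on version B (the rewrite author's own statement) =====
-- stated objective: alternative
-- what changed: Replaces A's fused per-element state-machine scan (nested while with a running read counter) by one .count pass for the writes plus index-jumps between consecutive 'W' positions, taking each read-segment length as a difference of positions.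
-- outside the precondition, e.g. on calcular_ciclos(['X'], 2): A does not finish within the time limit, B returns 1; on calcular_ciclos(['R'], 0): A raises ZeroDivisionError, B raises ZeroDivisionError
import Mathlib
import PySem

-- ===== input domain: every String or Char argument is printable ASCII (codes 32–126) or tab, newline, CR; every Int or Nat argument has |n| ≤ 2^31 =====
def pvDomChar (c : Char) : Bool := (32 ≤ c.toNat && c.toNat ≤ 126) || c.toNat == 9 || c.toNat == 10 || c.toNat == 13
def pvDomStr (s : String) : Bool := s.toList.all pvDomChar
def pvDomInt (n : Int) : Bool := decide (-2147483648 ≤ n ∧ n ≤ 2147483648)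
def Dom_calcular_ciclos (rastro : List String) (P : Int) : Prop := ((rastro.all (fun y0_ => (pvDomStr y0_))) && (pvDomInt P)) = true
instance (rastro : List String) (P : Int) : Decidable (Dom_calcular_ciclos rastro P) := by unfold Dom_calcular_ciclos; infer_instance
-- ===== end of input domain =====

-- B replaces A's fused per-element state-machine scan by a write count plus index-jumps
-- between consecutive 'W' positions (segment lengths from position differences; no running
-- read counter). Return-value equivalence on Pre_.

-- ===== PORT A =====
-- math.ceil(cont/P) ported as the exact integer ceiling -((-cont)//P); exact for P ≠ 0,
-- and Pre_ guarantees P ≠ 0 whenever the ceiling is reached with cont > 0.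
def mathCeilDiv (a b : Int) : Int := -(PySem.Int.floordiv (-a) b)

-- inner while: count of leading "R" of the current suffix
def countLeadR : List String → Nat
  | [] => 0
  | x :: r => if x == "R" then countLeadR r + 1 else 0

-- outer while, fuel-bounded for totality only: under Pre_ every iteration consumes
-- at least one element, so fuel = length suffices and is never exhausted.
def loopA (P : Int) : Nat → List String → Int → Int
  | 0, _, ciclos => ciclos
  | _ + 1, [], ciclos => ciclos
  | fuel + 1, x :: rest, ciclos =>
    if x == "W" then
      loopA P fuel rest (ciclos + 1)
    else
      let cont := countLeadR (x :: rest)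
      loopA P fuel ((x :: rest).drop cont) (ciclos + mathCeilDiv (cont : Int) P)

def calcular_ciclos (rastro : List String) (P : Int) : Int :=
  loopA P rastro.length rastro 0

-- ===== PORT B =====
-- "'W' in rastro[start:]" + "rastro.index('W', start)" ported together as index? of the
-- slice (none ↔ not in), shifted by start — exact for 0 ≤ start.
-- while loop with fuel for totality only: start grows by ≥ 1 per iteration, so
-- length+1 iterations always suffice (B's Python terminates on every input).
def loopB (rastro : List String) (P : Int) : Nat → Nat → Int → Int
  | 0, _, total => total
  | fuel + 1, start, total =>
    if start < rastro.length then
      let k : Nat :=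
        match PySem.List.index? (PySem.List.slice rastro (some (start : Int)) none) "W" with
        | some j => start + j
        | none => rastro.length
      loopB rastro P fuel (k + 1)
        (if start < k then total + -(PySem.Int.floordiv (-((k : Int) - (start : Int))) P) else total)
    else total

def calcular_ciclos_alt (rastro : List String) (P : Int) : Int :=
  loopB rastro P (rastro.length + 1) 0 ((PySem.List.count rastro "W" : Int))

-- ===== PRECONDITION & SPEC =====
-- Pre_ excludes exactly the inputs on which the Python A does not return: any element
-- other than "W"/"R" makes A's outer while loop forever, and P = 0 with an "R" present
-- raises ZeroDivisionError.
def Pre_calcular_ciclos (rastro : List String) (P : Int) : Prop :=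
  (∀ x ∈ rastro, x = "W" ∨ x = "R") ∧ (P ≠ 0 ∨ "R" ∉ rastro)
instance (rastro : List String) (P : Int) : Decidable (Pre_calcular_ciclos rastro P) := by
  unfold Pre_calcular_ciclos; infer_instance

def pvWitness_calcular_ciclos : List String × Int := (["R", "R", "W", "R"], 2)

def Spec_calcular_ciclos (rastro : List String) (P : Int) (out : Int) : Prop := out = calcular_ciclos_alt rastro P
instance (rastro : List String) (P : Int) (out : Int) : Decidable (Spec_calcular_ciclos rastro P out) := by unfold Spec_calcular_ciclos; infer_instance

-- ===== CLAIM (what is proved, stated in full; the proofs are below) =====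
def Claim_equal_calcular_ciclos : Prop := ∀ (rastro : List String) (P : Int), Dom_calcular_ciclos rastro P → Pre_calcular_ciclos rastro P → Spec_calcular_ciclos rastro P (calcular_ciclos rastro P)

-- ===== LEMMAS AND PROOFS =====

-- reference value: cycle cost of the read runs alone (writes counted separately)
def refC (P : Int) : List String → Int
  | [] => 0
  | x :: r =>
    if x = "W" then refC P r
    else if _h : countLeadR (x :: r) = 0 then 0
    else -(PySem.Int.floordiv (-((countLeadR (x :: r) : Nat) : Int)) P)
          + refC P ((x :: r).drop (countLeadR (x :: r)))
termination_by l => l.length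
decreasing_by
  · simp
  · simp only [List.length_drop, List.length_cons]
    omega

theorem countLeadR_decomp (l : List String) :
    List.replicate (countLeadR l) "R" ++ l.drop (countLeadR l) = l := by
  induction l with
  | nil => simp [countLeadR]
  | cons x r ih =>
    by_cases h : x = "R"
    · simp [countLeadR, h, List.replicate_succ, ih]
    · simp [countLeadR, h]

theorem countLeadR_all_R (l : List String) (h : ∀ x ∈ l, x = "R") :
    countLeadR l = l.length := by
  induction l with
  | nil => rfl
  | cons x r ih =>
    have hx := h x (by simp)
    simp [countLeadR, hx, ih (fun y hy => h y (by simp [hy]))]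

theorem countLeadR_replicate_W (j : Nat) (suf : List String) :
    countLeadR (List.replicate j "R" ++ "W" :: suf) = j := by
  induction j with
  | zero => simp [countLeadR]
  | succ j ih => simp [List.replicate_succ, countLeadR, ih]

theorem drop_replicate_W (j : Nat) (a : String) (b : String) (suf : List String) :
    (List.replicate j a ++ b :: suf).drop (j + 1) = suf := by
  induction j with
  | zero => simp
  | succ j ih => simpa [List.replicate_succ] using ih

theorem countW_decomp (l : List String) :
    PySem.List.count l "W" = PySem.List.count (l.drop (countLeadR l)) "W" := by
  conv_lhs => rw [← countLeadR_decomp l]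
  simp [PySem.List.count_eq, List.count_replicate]

-- A's fuelled loop: accumulator + write count + read-run cost
theorem lemA (P : Int) :
    ∀ fuel (l : List String) (acc : Int),
      (∀ x ∈ l, x = "W" ∨ x = "R") → l.length ≤ fuel →
      loopA P fuel l acc = acc + (PySem.List.count l "W" : Int) + refC P l := by
  intro fuel
  induction fuel with
  | zero =>
    intro l acc _ hlen
    have : l = [] := by cases l <;> simp_all
    subst this
    simp [loopA, refC, PySem.List.count]
  | succ fuel ih =>
    intro l acc hall hlen
    cases l with
    | nil => simp [loopA, refC, PySem.List.count]
    | cons x r =>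
      rcases hall x (by simp) with hW | hR
      · subst hW
        simp only [loopA, beq_self_eq_true, if_true]
        rw [ih r (acc + 1) (fun y hy => hall y (by simp [hy])) (by simpa using Nat.lt_succ_iff.mp (by simpa using hlen))]
        have hcw : PySem.List.count ("W" :: r) "W" = PySem.List.count r "W" + 1 := by
          simp [PySem.List.count_eq]
        rw [hcw, refC, if_pos rfl]
        push_cast
        ring
      · subst hR
        simp only [loopA, show (("R" : String) == "W") = false by decide,
          Bool.false_eq_true, if_false]
        set l := "R" :: r with hl
        have hpos : 0 < countLeadR l := by simp [hl, countLeadR]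
        have hlenpos : 0 < l.length := by rw [hl]; simp
        have hall' : ∀ x ∈ l.drop (countLeadR l), x = "W" ∨ x = "R" :=
          fun y hy => hall y (List.mem_of_mem_drop hy)
        have hdlen : (l.drop (countLeadR l)).length ≤ fuel := by
          simp only [List.length_drop]
          omega
        rw [ih (l.drop (countLeadR l)) _ hall' hdlen]
        rw [countW_decomp l]
        rw [show refC P l = -(PySem.Int.floordiv (-((countLeadR l : Nat) : Int)) P)
              + refC P (l.drop (countLeadR l)) by
          rw [hl, refC]
          rw [if_neg (by decide : ¬ ("R" : String) = "W"), dif_neg (by rw [← hl]; omega)]]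
        unfold mathCeilDiv
        ring

-- B's fuelled loop: total + read-run cost of the suffix from start
theorem lemB (rastro : List String) (P : Int)
    (hall : ∀ x ∈ rastro, x = "W" ∨ x = "R") :
    ∀ fuel (start : Nat) (total : Int),
      start ≤ rastro.length → rastro.length + 1 - start ≤ fuel →
      loopB rastro P fuel start total = total + refC P (rastro.drop start) := by
  intro fuel
  induction fuel with
  | zero => intro start total h1 h2; omega
  | succ fuel ih =>
    intro start total hstart hfuel
    by_cases hlt : start < rastro.length
    · have hs : rastro.drop start ≠ [] := by
        simp only [ne_eq, List.drop_eq_nil_iff]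
        omega
      simp only [loopB, if_pos hlt]
      rw [PySem.List.slice_from_natCast]
      cases hidx : PySem.List.index? (rastro.drop start) "W" with
      | none =>
        have hnW : "W" ∉ rastro.drop start := (PySem.List.index?_eq_none_iff _ _).mp hidx
        have hallR : ∀ x ∈ rastro.drop start, x = "R" := by
          intro x hx
          rcases hall x (List.mem_of_mem_drop hx) with h | h
          · exact absurd (h ▸ hx) hnW
          · exact h
        have hc : countLeadR (rastro.drop start) = rastro.length - start := by
          rw [countLeadR_all_R _ hallR, List.length_drop]
        -- the loop adds the full suffix's ceiling and exits on the next iteration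
        have hcond : start < rastro.length := hlt
        simp only [if_pos hcond]
        cases fuel with
        | zero => omega
        | succ fuel' =>
          have : ¬ rastro.length + 1 < rastro.length := by omega
          simp only [loopB, if_neg this]
          -- right-hand side: a nonempty all-"R" suffix
          cases hdrop : rastro.drop start with
          | nil => exact absurd hdrop hs
          | cons x rest =>
            have hx : x = "R" := hallR x (by rw [hdrop]; simp)
            subst hx
            rw [refC]
            rw [if_neg (by decide : ¬ ("R" : String) = "W")]
            have hcc : countLeadR ("R" :: rest) = rastro.length - start := by
              rw [← hdrop]; exact hc
            rw [dif_neg (by rw [hcc]; omega)]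
            have hdropall : ("R" :: rest).drop (countLeadR ("R" :: rest)) = [] := by
              rw [hcc]
              have : ("R" :: rest).length = rastro.length - start := by
                rw [← hdrop, List.length_drop]
              simp [List.drop_eq_nil_iff, this]
            rw [hdropall]
            rw [hcc]
            have hcast : ((rastro.length - start : Nat) : Int)
                = (rastro.length : Int) - (start : Int) := by
              push_cast [Nat.cast_sub (le_of_lt hlt)]; ring
            rw [hcast]
            simp only [refC]
            ring
      | some j =>
        rcases (PySem.List.index?_eq_some_iff _ _ _).mp hidx with ⟨pre, suf, hsplit, hjlen, hWpre⟩
        have hpreR : ∀ x ∈ pre, x = "R" := by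
          intro x hx
          have hxl : x ∈ rastro.drop start := by rw [hsplit]; exact List.mem_append_left _ hx
          rcases hall x (List.mem_of_mem_drop hxl) with h | h
          · exact absurd (h ▸ hx) hWpre
          · exact h
        have hpre_rep : pre = List.replicate j "R" := by
          rw [← hjlen]
          exact List.eq_replicate_of_mem hpreR
        have hsuffix : rastro.drop start = List.replicate j "R" ++ "W" :: suf := by
          rw [hsplit, hpre_rep]
        have hslen : (rastro.drop start).length = j + 1 + suf.length := by
          rw [hsuffix, List.length_append, List.length_replicate, List.length_cons]
          omega
        have hstartlt : start + j + 1 ≤ rastro.length := by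
          rw [List.length_drop] at hslen
          omega
        have hdropnext : rastro.drop (start + j + 1) = suf := by
          have h1 : rastro.drop (start + j + 1) = (rastro.drop start).drop (j + 1) := by
            rw [List.drop_drop]
            congr 1
            try omega
          rw [h1, hsuffix, drop_replicate_W]
        cases j with
        | zero =>
          simp only [Nat.add_zero, if_neg (lt_irrefl start)]
          have hs0 : rastro.drop start = "W" :: suf := by simpa using hsuffix
          rw [show start + 0 + 1 = start + 1 by ring]
          rw [ih (start + 1) total (by omega) (by omega)]
          have : rastro.drop (start + 1) = suf := by
            simpa using hdropnext
          rw [this, hs0, refC, if_pos rfl]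
        | succ jj =>
          have hklt : start < start + (jj + 1) := by omega
          simp only [if_pos hklt]
          rw [show start + (jj + 1) + 1 = start + (jj + 1) + 1 by ring]
          rw [ih (start + (jj + 1) + 1) _ (by omega) (by omega)]
          rw [hdropnext]
          -- right-hand side
          rw [hsuffix]
          have hrep : List.replicate (jj + 1) ("R" : String) ++ "W" :: suf
              = "R" :: (List.replicate jj "R" ++ "W" :: suf) := by
            simp [List.replicate_succ]
          rw [hrep, refC]
          rw [if_neg (by decide : ¬ ("R" : String) = "W")]
          have hcl : countLeadR ("R" :: (List.replicate jj "R" ++ "W" :: suf)) = jj + 1 := by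
            have := countLeadR_replicate_W (jj + 1) suf
            rwa [hrep] at this
          rw [dif_neg (by rw [hcl]; omega), hcl]
          have hdropc : ("R" :: (List.replicate jj "R" ++ "W" :: suf)).drop (jj + 1)
              = "W" :: suf := by
            have := drop_replicate_W (jj + 1) "R" "W" suf
            rw [hrep] at this
            simpa using this
          rw [hdropc, refC, if_pos rfl]
          have hcast : ((start + (jj + 1) : Nat) : Int) - (start : Int) = ((jj + 1 : Nat) : Int) := by
            push_cast; ring
          rw [hcast]
          ring
    · simp only [loopB, if_neg hlt]
      have : rastro.drop start = [] := by
        simp only [List.drop_eq_nil_iff]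
        omega
      rw [this]
      simp [refC]

-- ===== VERDICT (by name: the statement is the Claim_ definition above) =====
theorem calcular_ciclos_spec : Claim_equal_calcular_ciclos := by
  intro rastro P _ hpre
  unfold Spec_calcular_ciclos calcular_ciclos calcular_ciclos_alt
  rw [lemA P rastro.length rastro 0 hpre.1 le_rfl]
  rw [lemB rastro P hpre.1 (rastro.length + 1) 0 ((PySem.List.count rastro "W" : Int)) (by omega) (by omega)]
  rw [List.drop_zero]
  ring
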